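-- pv_equiv track=rewrite | github.com/DooHongKm/Algorithm_Solutions | 프로그래머스/unrated/160586. 대충 만든 자판/대충 만든 자판.py | solution
-- ===== SOURCE A (Python) =====
-- def solution(keymap, targets):
--     answer = [0] * len(targets)
--     key_dict = {}
--     for k in keymap:
--         for i in range(len(k)):
--             temp = k[i]
--             if temp in key_dict:
--                 key_dict[temp] = min(key_dict[temp], i + 1)
--             else:
--                 key_dict[temp] = i + 1
--     for i in range(len(targets)):
--         count = 0
--         for j in range(len(targets[i])):
--             temp = targets[i][j]
--             if temp in key_dict:
--                 count += key_dict[temp]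
--             else:
--                 count = -1
--                 break
--         answer[i] = count
--     return answer
-- ===== SOURCE B (Python) =====
-- def solution(keymap, targets):
--     cost = {c: min((i for k in keymap for i, ch in enumerate(k, 1) if ch == c),
--                    default=-1)
--             for c in dict.fromkeys(c for t in targets for c in t)}
--     return [-1 if any(cost[c] == -1 for c in t) else sum(cost[c] for c in t)
--             for t in targets]
-- ===== Notes on version B (the rewrite author's own statement) =====
-- stated objective: alternative
-- what changed: Replaces A's eager keymap scan with incremental min-updates into a dict by a demand-driven table: for each character actually queried by the targets, its cost is computed in one shot as min over a flat scan of all (position, char) occurrences in keymap (-1 if absent), and each answer becomes a validate-then-sum over that table instead of A's early-break accumulating loop.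
import Mathlib
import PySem

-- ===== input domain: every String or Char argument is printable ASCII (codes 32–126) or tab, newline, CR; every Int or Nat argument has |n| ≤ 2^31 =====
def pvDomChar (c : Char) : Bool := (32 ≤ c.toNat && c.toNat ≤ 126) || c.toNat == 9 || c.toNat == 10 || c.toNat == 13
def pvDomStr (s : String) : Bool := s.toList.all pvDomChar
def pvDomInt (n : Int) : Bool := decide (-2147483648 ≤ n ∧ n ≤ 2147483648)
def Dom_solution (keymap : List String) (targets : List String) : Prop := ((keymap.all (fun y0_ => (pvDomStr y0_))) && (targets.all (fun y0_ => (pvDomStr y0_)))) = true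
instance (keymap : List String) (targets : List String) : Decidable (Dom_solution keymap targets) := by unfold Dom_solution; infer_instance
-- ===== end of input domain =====

-- B replaces A's eager min-update dict build by a demand-driven table: each character the
-- targets actually query gets its cost in one shot as a min over a flat scan of all
-- (position, char) occurrences in keymap, and answers are validate-then-sum (alternative).

-- ===== PORT A =====
-- inner loop 'for i in range(len(k))'; k[i] is always in range, so getD is exact here
def solutionBuildKey (d : PySem.Dict Char Int) (k : List Char) : PySem.Dict Char Int :=
  (List.range k.length).foldl (fun d (i : Nat) =>
    let temp := k.getD i ' '
    if (d.get? temp).isSome then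
      d.insert temp (min (d.getD temp 0) ((i : Int) + 1))
    else
      d.insert temp ((i : Int) + 1)) d

-- inner loop over targets[i] with 'count = -1; break' on a missing char
def solutionCount (d : PySem.Dict Char Int) : List Char → Int → Int
  | [], count => count
  | temp :: rest, count =>
    if (d.get? temp).isSome then solutionCount d rest (count + d.getD temp 0)
    else -1

def solution (keymap : List String) (targets : List String) : List Int :=
  let key_dict := keymap.foldl (fun d k => solutionBuildKey d k.toList) PySem.Dict.empty
  targets.map (fun t => solutionCount key_dict t.toList 0)

-- ===== PORT B =====
-- the generator '(i for k in keymap for i, ch in enumerate(k, 1) if ch == c)'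
def altOccs (keymap : List String) (c : Char) : List Int :=
  keymap.flatMap (fun k =>
    (PySem.List.enumerate k.toList 1).filterMap
      (fun p => if p.2 = c then some p.1 else none))

-- 'min(..., default=-1)'
def altCost (keymap : List String) (c : Char) : Int :=
  PySem.List.minD (altOccs keymap c) (fun x => x) (-1)

-- dict comprehension over the (order-preserving) dedup of all target chars, then the
-- comprehension over targets; 'cost[c]' is always present there, so getD's default is dead
def solution_alt (keymap : List String) (targets : List String) : List Int :=
  let cost := (PySem.List.dedup (targets.flatMap (fun t => t.toList))).foldl
      (fun d c => d.insert c (altCost keymap c)) PySem.Dict.empty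
  targets.map (fun t =>
    if t.toList.any (fun c => cost.getD c 0 == -1) then -1
    else (t.toList.map (fun c => cost.getD c 0)).sum)

-- ===== PRECONDITION & SPEC =====
def Spec_solution (keymap : List String) (targets : List String) (out : List Int) : Prop := out = solution_alt keymap targets
instance (keymap : List String) (targets : List String) (out : List Int) : Decidable (Spec_solution keymap targets out) := by unfold Spec_solution; infer_instance

-- ===== CLAIM (what is proved, stated in full; the proofs are below) =====
def Claim_equal_solution : Prop := ∀ (keymap : List String) (targets : List String), Dom_solution keymap targets → Spec_solution keymap targets (solution keymap targets)

-- ===== LEMMAS AND PROOFS =====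

-- running min over an optional accumulator (proof-only helper)
def ominStep (o : Option Int) (x : Int) : Option Int :=
  some (match o with | none => x | some a => min a x)

-- occurrences of c in one key, positions starting at j
def occList (cs : List Char) (j : Int) (c : Char) : List Int :=
  (PySem.List.enumerate cs j).filterMap (fun p => if p.2 = c then some p.1 else none)

-- A's index loop over range(len k) equals an enumerate loop (offset-generalised)
lemma range_fold_eq_enumerate_fold (F : PySem.Dict Char Int → Int → Char → PySem.Dict Char Int) :
    ∀ (cs : List Char) (j : Int) (d : PySem.Dict Char Int),
      (List.range cs.length).foldl (fun d (i : Nat) => F d (j + (i : Int) + 1) (cs.getD i ' ')) d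
        = (PySem.List.enumerate cs (j + 1)).foldl (fun d p => F d p.1 p.2) d := by
  intro cs
  induction cs with
  | nil => intro j d; simp [PySem.List.enumerate]
  | cons c rest ih =>
    intro j d
    rw [List.length_cons, List.range_succ_eq_map]
    simp only [List.foldl_cons, List.foldl_map, PySem.List.enumerate]
    have hc : (j + ((0 : Nat) : Int) + 1) = j + 1 := by simp
    rw [show (c :: rest).getD 0 ' ' = c from rfl, hc]
    have hfun : (fun (d : PySem.Dict Char Int) (i : Nat) =>
          F d (j + ((i + 1 : Nat) : Int) + 1) ((c :: rest).getD (i + 1) ' '))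
        = (fun d (i : Nat) => F d ((j + 1) + (i : Int) + 1) (rest.getD i ' ')) := by
      funext d i
      have : (j + ((i + 1 : Nat) : Int) + 1) = (j + 1) + (i : Int) + 1 := by push_cast; ring
      rw [this]; rfl
    rw [hfun, ih (j + 1)]

-- one key's enumerate loop of A's min-update, seen at key c: a running min over occList
lemma buildKeyEnum_get? (c : Char) :
    ∀ (cs : List Char) (j : Int) (d : PySem.Dict Char Int),
      (((PySem.List.enumerate cs j).foldl (fun d p =>
          if (d.get? p.2).isSome then d.insert p.2 (min (d.getD p.2 0) p.1)
          else d.insert p.2 p.1) d).get? c)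
        = (occList cs j c).foldl ominStep (d.get? c) := by
  intro cs
  induction cs with
  | nil => intro j d; simp [occList, PySem.List.enumerate]
  | cons ch rest ih =>
    intro j d
    rw [PySem.List.enumerate_cons]
    simp only [List.foldl_cons]
    by_cases hch : ch = c
    · subst hch
      have hstep : ((if ((d.get? ch).isSome) then d.insert ch (min (d.getD ch 0) j)
            else d.insert ch j).get? ch) = ominStep (d.get? ch) j := by
        cases h : d.get? ch with
        | none => simp [ominStep, PySem.Dict.get?_insert_self]
        | some v => simp [h, ominStep, PySem.Dict.getD, PySem.Dict.get?_insert_self]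
      rw [ih (j + 1), hstep]
      simp [occList, PySem.List.enumerate_cons]
    · have hne : c ≠ ch := fun h' => hch h'.symm
      have hstep : ((if ((d.get? ch).isSome) then d.insert ch (min (d.getD ch 0) j)
            else d.insert ch j).get? c) = d.get? c := by
        split_ifs <;> simp [PySem.Dict.get?_insert_of_ne _ _ hne]
      rw [ih (j + 1)]
      rw [hstep]
      simp [occList, PySem.List.enumerate_cons, hch]

-- A's whole dict build, looked up at c: running min over all occurrences in keymap
lemma buildDict_get? (c : Char) :
    ∀ (km : List String) (d : PySem.Dict Char Int),
      ((km.foldl (fun d k => solutionBuildKey d k.toList) d).get? c)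
        = (altOccs km c).foldl ominStep (d.get? c) := by
  intro km
  induction km with
  | nil => intro d; simp [altOccs]
  | cons k rest ih =>
    intro d
    simp only [List.foldl_cons]
    rw [ih]
    have hkey : (solutionBuildKey d k.toList).get? c
        = (occList k.toList 1 c).foldl ominStep (d.get? c) := by
      unfold solutionBuildKey
      have h := range_fold_eq_enumerate_fold
          (fun d pos ch => if (d.get? ch).isSome then d.insert ch (min (d.getD ch 0) pos)
            else d.insert ch pos) k.toList 0 d
      simp only [zero_add] at h
      have h2 := buildKeyEnum_get? c k.toList 1 d
      rw [← h] at h2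
      rw [← h2]
    rw [hkey]
    simp [altOccs, occList, List.foldl_append]

lemma foldl_ominStep_some : ∀ (t : List Int) (a : Int),
    t.foldl ominStep (some a) = some (t.foldl min a) := by
  intro t
  induction t with
  | nil => intro a; rfl
  | cons x r ih => intro a; simp only [List.foldl_cons, ominStep]; exact ih (min a x)

lemma foldl_ominStep_eq_min? (xs : List Int) :
    xs.foldl ominStep none = PySem.List.min? xs (fun x => x) := by
  cases xs with
  | nil => rfl
  | cons x t =>
    rw [PySem.List.min?_id_cons]
    simp only [List.foldl_cons, ominStep]
    exact foldl_ominStep_some t x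

-- every occurrence position is at least 1
lemma altOccs_pos (keymap : List String) (c : Char) :
    ∀ x ∈ altOccs keymap c, 1 ≤ x := by
  intro x hx
  simp only [altOccs, List.mem_flatMap, List.mem_filterMap] at hx
  obtain ⟨k, _, p, hp, hpx⟩ := hx
  by_cases h2 : p.2 = c
  · rw [h2, if_pos rfl] at hpx
    cases hpx
    have : p.1 ∈ (PySem.List.enumerate k.toList 1).map (·.1) := List.mem_map_of_mem hp
    rw [PySem.List.map_fst_enumerate] at this
    exact (PySem.List.mem_pyRange_one.mp this).1
  · simp [h2] at hpx

-- the dict-comprehension table: lookup of any listed char gives its computed cost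
lemma table_get? (f : Char → Int) :
    ∀ (cs : List Char) (d : PySem.Dict Char Int) (c : Char),
      ((cs.foldl (fun d c => d.insert c (f c)) d).get? c)
        = if c ∈ cs then some (f c) else d.get? c := by
  intro cs
  induction cs with
  | nil => intro d c; simp
  | cons x r ih =>
    intro d c
    simp only [List.foldl_cons]
    rw [ih]
    rw [PySem.Dict.get?_insert]
    by_cases hc : c ∈ r
    · simp [hc]
    · by_cases hx : c = x <;> simp [hc, hx]

-- A's per-target early-break loop agrees with validate-then-sum over any table g
-- that carries altCost for the chars of the target
lemma count_eq_table (keymap : List String) (dA : PySem.Dict Char Int)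
    (hA : ∀ c, dA.get? c = PySem.List.min? (altOccs keymap c) (fun x => x))
    (g : Char → Int) :
    ∀ (cs : List Char), (∀ c ∈ cs, g c = altCost keymap c) → ∀ (acc : Int),
      solutionCount dA cs acc
        = if cs.any (fun c => g c == -1) then -1 else acc + (cs.map g).sum := by
  intro cs
  induction cs with
  | nil => intro _ acc; simp [solutionCount]
  | cons c rest ih =>
    intro hg acc
    have hgc : g c = altCost keymap c := hg c (List.mem_cons_self)
    have hrest : ∀ c' ∈ rest, g c' = altCost keymap c' :=
      fun c' hc' => hg c' (List.mem_cons_of_mem _ hc')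
    simp only [solutionCount, hA c]
    cases h : PySem.List.min? (altOccs keymap c) (fun x => x) with
    | none =>
      have : g c = -1 := by
        rw [hgc]; unfold altCost; simp [PySem.List.minD, h]
      simp [this]
    | some p =>
      have hp1 : 1 ≤ p := altOccs_pos keymap c p (PySem.List.min?_mem h)
      have hgp : g c = p := by
        rw [hgc]; unfold altCost; simp [PySem.List.minD, h]
      have hne : (g c == -1) = false := by
        rw [hgp]; simp; omega
      simp only [Option.isSome_some, if_true, PySem.Dict.getD, hA c, h,
        Option.getD_some, List.any_cons, hne, Bool.false_or, List.map_cons,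
        List.sum_cons]
      rw [ih hrest (acc + p)]
      split_ifs with hany
      · rfl
      · rw [hgp]; ring

-- ===== VERDICT (by name: the statement is the Claim_ definition above) =====
theorem solution_spec : Claim_equal_solution := by
  intro keymap targets _
  unfold Spec_solution solution solution_alt
  apply List.map_congr_left
  intro t ht
  have hA : ∀ c, (keymap.foldl (fun d k => solutionBuildKey d k.toList)
      PySem.Dict.empty).get? c = PySem.List.min? (altOccs keymap c) (fun x => x) := by
    intro c
    rw [buildDict_get? c keymap PySem.Dict.empty]
    have : (PySem.Dict.empty : PySem.Dict Char Int).get? c = none := rfl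
    rw [this]
    exact foldl_ominStep_eq_min? (altOccs keymap c)
  have hg : ∀ c ∈ t.toList,
      ((PySem.List.dedup (targets.flatMap (fun t => t.toList))).foldl
          (fun d c => d.insert c (altCost keymap c)) PySem.Dict.empty).getD c 0
        = altCost keymap c := by
    intro c hc
    have hmem : c ∈ PySem.List.dedup (targets.flatMap (fun t => t.toList)) := by
      rw [PySem.List.mem_dedup]
      exact List.mem_flatMap.mpr ⟨t, ht, hc⟩
    rw [PySem.Dict.getD, table_get? (altCost keymap) _ PySem.Dict.empty c, if_pos hmem]
    rfl
  rw [count_eq_table keymap _ hA _ t.toList hg 0]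
  split_ifs with h1
  · rfl
  · rw [zero_add]
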